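-- pv_equiv track=rewrite | github.com/GanizaniSitara/hexmap | tools/convert_to_hexmap.py | generate_spiral_positions
-- ===== SOURCE A (Python) =====
-- HEX_DIRECTIONS = [(1, 0), (0, 1), (-1, 1), (-1, 0), (0, -1), (1, -1)]
--
-- def generate_spiral_positions(count, center_q=0, center_r=0):
--     """Generate hex grid positions in a spiral pattern."""
--     positions = [(center_q, center_r)]
--
--     if count <= 1:
--         return positions[:count]
--
--     q, r = center_q, center_r
--     ring = 1
--
--     while len(positions) < count:
--         # Move to start of ring (one step in direction 4, then direction 5)
--         q += HEX_DIRECTIONS[4][0]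
--         r += HEX_DIRECTIONS[4][1]
--
--         # Walk around the ring
--         for direction in range(6):
--             for _ in range(ring):
--                 if len(positions) >= count:
--                     return positions
--                 positions.append((q, r))
--                 q += HEX_DIRECTIONS[direction][0]
--                 r += HEX_DIRECTIONS[direction][1]
--
--         ring += 1
--
--     return positions[:count]
-- ===== SOURCE B (Python) =====
-- HEX_DIRECTIONS = [(1, 0), (0, 1), (-1, 1), (-1, 0), (0, -1), (1, -1)]
--
-- # Cumulative direction sums: corner offset (per unit ring radius) of each side's start.
-- _CORNERS = [(0, 0), (1, 0), (1, 1), (0, 2), (-1, 2), (-1, 1)]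
--
-- def generate_spiral_positions(count, center_q=0, center_r=0):
--     """Generate hex grid positions in a spiral pattern (index-formula version)."""
--     positions = []
--     k, side, step = 1, 0, 0
--     for i in range(count):
--         if i == 0:
--             positions.append((center_q, center_r))
--         else:
--             cq, cr = _CORNERS[side]
--             dq, dr = HEX_DIRECTIONS[side]
--             positions.append((center_q + cq * k + dq * step,
--                               center_r - k + cr * k + dr * step))
--             step += 1
--             if step == k:
--                 step, side = 0, side + 1
--                 if side == 6:
--                     side, k = 0, k + 1
--     return positions
-- ===== Notes on version B (the rewrite author's own statement) =====
-- stated objective: alternative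
-- what changed: A walks the spiral step by step, mutating (q, r) and checking the count before every append inside three nested loops with mid-loop early returns; B computes each position directly by an index formula (ring/side/step odometer counters plus precomputed corner offsets, position = center + corner*k + direction*step) in a single flat loop with no walking state and no truncation.
import Mathlib
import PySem

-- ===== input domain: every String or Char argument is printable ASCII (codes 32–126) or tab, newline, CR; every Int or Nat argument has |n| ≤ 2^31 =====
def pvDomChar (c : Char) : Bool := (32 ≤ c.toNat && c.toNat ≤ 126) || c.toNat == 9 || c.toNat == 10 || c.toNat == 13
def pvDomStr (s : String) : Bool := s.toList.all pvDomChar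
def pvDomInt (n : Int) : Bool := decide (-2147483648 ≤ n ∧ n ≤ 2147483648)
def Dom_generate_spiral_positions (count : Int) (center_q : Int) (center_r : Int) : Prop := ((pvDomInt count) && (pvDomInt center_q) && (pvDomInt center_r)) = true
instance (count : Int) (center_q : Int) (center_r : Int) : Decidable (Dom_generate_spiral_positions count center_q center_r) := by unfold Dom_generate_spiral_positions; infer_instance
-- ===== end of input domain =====

-- B replaces A's step-by-step walk (with mid-loop early returns) by a per-index closed
-- formula: each position is computed directly from ring/side/step odometer counters.

-- ===== PORT A =====
def pvHexDirs : List (Int × Int) := [(1, 0), (0, 1), (-1, 1), (-1, 0), (0, -1), (1, -1)]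

/-- inner `for _ in range(ring)` loop of A; `Sum.inl` = the early `return positions`,
`Sum.inr` = fall through with the updated `(positions, q, r)`. -/
def pvWalkSteps (count : Int) (positions : List (Int × Int)) (q r dq dr : Int) :
    Nat → (List (Int × Int)) ⊕ (List (Int × Int) × Int × Int)
  | 0 => Sum.inr (positions, q, r)
  | n + 1 =>
    if (positions.length : Int) ≥ count then Sum.inl positions
    else pvWalkSteps count (positions ++ [(q, r)]) (q + dq) (r + dr) dq dr n

/-- `for direction in range(6)` loop of A, over the (remaining) direction list. -/
def pvWalkDirs (count : Int) (positions : List (Int × Int)) (q r : Int) (ring : Nat) :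
    List (Int × Int) → (List (Int × Int)) ⊕ (List (Int × Int) × Int × Int)
  | [] => Sum.inr (positions, q, r)
  | (dq, dr) :: ds =>
    match pvWalkSteps count positions q r dq dr ring with
    | Sum.inl p => Sum.inl p
    | Sum.inr (p, q', r') => pvWalkDirs count p q' r' ring ds

/-- used by `pvSpiralLoop`'s termination proof. -/
theorem pvWalkSteps_inr_length (count : Int) (p : List (Int × Int)) (q r dq dr : Int) (n : Nat)
    (p' : List (Int × Int)) (q' r' : Int)
    (h : pvWalkSteps count p q r dq dr n = Sum.inr (p', q', r')) : p'.length = p.length + n := by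
  induction n generalizing p q r with
  | zero =>
    simp [pvWalkSteps] at h
    simp [h.1]
  | succ n ih =>
    rw [pvWalkSteps] at h
    split at h
    · exact absurd h (by simp)
    · have := ih _ _ _ h
      simp at this
      omega

/-- used by `pvSpiralLoop`'s termination proof. -/
theorem pvWalkDirs_inr_length (count : Int) (p : List (Int × Int)) (q r : Int) (ring : Nat)
    (ds : List (Int × Int)) (p' : List (Int × Int)) (q' r' : Int)
    (h : pvWalkDirs count p q r ring ds = Sum.inr (p', q', r')) :
    p'.length = p.length + ring * ds.length := by
  induction ds generalizing p q r with
  | nil =>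
    simp [pvWalkDirs] at h
    simp [h.1]
  | cons d ds ih =>
    obtain ⟨dq, dr⟩ := d
    rw [pvWalkDirs] at h
    split at h
    · exact absurd h (by simp)
    · rename_i p1 q1 r1 hw
      have h1 := pvWalkSteps_inr_length count p q r dq dr ring p1 q1 r1 hw
      have h2 := ih _ _ _ h
      simp [h2, h1]
      ring

/-- the `while len(positions) < count` loop of A; `ringm + 1` is Python's `ring`. -/
def pvSpiralLoop (count : Int) (positions : List (Int × Int)) (q r : Int) (ringm : Nat) :
    List (Int × Int) :=
  if _h : (positions.length : Int) < count then
    match hw : pvWalkDirs count positions q (r - 1) (ringm + 1) pvHexDirs with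
    | Sum.inl p => p
    | Sum.inr (p, q', r') => pvSpiralLoop count p q' r' (ringm + 1)
  else PySem.List.slice positions none (some count)
termination_by (count - positions.length).toNat
decreasing_by
  have hl := pvWalkDirs_inr_length count positions q (r - 1) (ringm + 1) pvHexDirs p q' r' hw
  simp [pvHexDirs] at hl
  omega

def generate_spiral_positions (count : Int) (center_q : Int) (center_r : Int) :
    List (Int × Int) :=
  let positions : List (Int × Int) := [(center_q, center_r)]
  if count ≤ 1 then PySem.List.slice positions none (some count)
  else pvSpiralLoop count positions center_q center_r 0

-- ===== PORT B =====
def pvCorners : List (Int × Int) := [(0, 0), (1, 0), (1, 1), (0, 2), (-1, 2), (-1, 1)]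

/-- body of B's `for i in range(count)` loop; state = (positions, k, side, step). -/
def pvAltStep (center_q center_r : Int) (st : List (Int × Int) × Int × Int × Int) (i : Int) :
    List (Int × Int) × Int × Int × Int :=
  match st with
  | (positions, k, side, step) =>
    if i = 0 then (positions ++ [(center_q, center_r)], k, side, step)
    else
      let c := PySem.List.pyGetD pvCorners side ((0 : Int), (0 : Int))
      let d := PySem.List.pyGetD pvHexDirs side ((0 : Int), (0 : Int))
      let positions := positions ++
        [(center_q + c.1 * k + d.1 * step, center_r - k + c.2 * k + d.2 * step)]
      let step := step + 1
      if step = k then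
        let side := side + 1
        if side = 6 then (positions, k + 1, 0, 0)
        else (positions, k, side, 0)
      else (positions, k, side, step)

def generate_spiral_positions_alt (count : Int) (center_q : Int) (center_r : Int) :
    List (Int × Int) :=
  ((PySem.List.pyRange 0 count 1).foldl (pvAltStep center_q center_r) ([], 1, 0, 0)).1

-- ===== PRECONDITION & SPEC =====
def Spec_generate_spiral_positions (count : Int) (center_q : Int) (center_r : Int) (out : List (Int × Int)) : Prop := out = generate_spiral_positions_alt count center_q center_r
instance (count : Int) (center_q : Int) (center_r : Int) (out : List (Int × Int)) : Decidable (Spec_generate_spiral_positions count center_q center_r out) := by unfold Spec_generate_spiral_positions; infer_instance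

-- ===== CLAIM (what is proved, stated in full; the proofs are below) =====
def Claim_equal_generate_spiral_positions : Prop := ∀ (count : Int) (center_q : Int) (center_r : Int), Dom_generate_spiral_positions count center_q center_r → Spec_generate_spiral_positions count center_q center_r (generate_spiral_positions count center_q center_r)

-- ===== LEMMAS AND PROOFS =====

/-- the `ring` points of one side: start `(q,r)`, walk `n` steps in direction `(dq,dr)`. -/
def pvSidePts (q r dq dr : Int) (n : Nat) : List (Int × Int) :=
  (List.range n).map fun (s : Nat) => (q + dq * (s : Int), r + dr * (s : Int))

/-- all points of one ring of radius `k`, walking the given directions from `(q,r)`. -/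
def pvRingWalk (q r : Int) (dirs : List (Int × Int)) (k : Nat) : List (Int × Int) :=
  match dirs with
  | [] => []
  | (dq, dr) :: ds => pvSidePts q r dq dr k ++ pvRingWalk (q + dq * k) (r + dr * k) ds k

/-- end coordinates after walking all the given sides. -/
def pvRingEnd (q r : Int) (dirs : List (Int × Int)) (k : Nat) : Int × Int :=
  match dirs with
  | [] => (q, r)
  | (dq, dr) :: ds => pvRingEnd (q + dq * k) (r + dr * k) ds k

/-- points of rings `m+1, m+2, …, m+j` spiralling out from `(q,r)`. -/
def pvRingsFrom (q r : Int) (m : Nat) : Nat → List (Int × Int)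
  | 0 => []
  | j + 1 => pvRingWalk q (r - 1) pvHexDirs (m + 1) ++ pvRingsFrom q (r - 1) (m + 1) j

/-- the full spiral: the center followed by `J` rings. -/
def pvSpiral (cq cr : Int) (J : Nat) : List (Int × Int) := (cq, cr) :: pvRingsFrom cq cr 0 J

theorem pvSidePts_length (q r dq dr : Int) (n : Nat) : (pvSidePts q r dq dr n).length = n := by
  simp [pvSidePts]

theorem pvRingWalk_length (dirs : List (Int × Int)) (k : Nat) : ∀ q r,
    (pvRingWalk q r dirs k).length = k * dirs.length := by
  induction dirs with
  | nil => simp [pvRingWalk]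
  | cons d ds ih =>
    obtain ⟨dq, dr⟩ := d
    intro q r
    simp [pvRingWalk, pvSidePts_length, ih]
    ring

theorem pvRingsFrom_length (j : Nat) : ∀ (q r : Int) (m : Nat),
    (pvRingsFrom q r m j).length = 6 * m * j + 3 * j * (j + 1) := by
  induction j with
  | zero => simp [pvRingsFrom]
  | succ j ih =>
    intro q r m
    simp [pvRingsFrom, pvRingWalk_length, ih, pvHexDirs]
    ring

theorem pvSidePts_zero (q r dq dr : Int) : pvSidePts q r dq dr 0 = [] := by simp [pvSidePts]

theorem pvSidePts_succ (q r dq dr : Int) (n : Nat) :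
    pvSidePts q r dq dr (n + 1) = (q, r) :: pvSidePts (q + dq) (r + dr) dq dr n := by
  unfold pvSidePts
  rw [List.range_succ_eq_map, List.map_cons, List.map_map]
  simp only [Nat.cast_zero, mul_zero, add_zero]
  congr 1
  apply List.map_congr_left
  intro s _
  simp only [Function.comp_apply, Nat.succ_eq_add_one]
  push_cast
  rw [Prod.mk.injEq]
  constructor <;> ring

theorem pvSidePts_take (q r dq dr : Int) (n m : Nat) :
    (pvSidePts q r dq dr n).take m = pvSidePts q r dq dr (min m n) := by
  unfold pvSidePts
  rw [← List.map_take, List.take_range]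

/-- Characterisation of A's innermost loop: it either completes the side (`inr`)
or stops early with exactly `count` positions (`inl`). -/
theorem pvWalkSteps_char (count : Int) (n : Nat) : ∀ (p : List (Int × Int)) (q r dq dr : Int),
    (p.length : Int) ≤ count →
    pvWalkSteps count p q r dq dr n =
      if ((p.length : Int) + n ≤ count) then
        Sum.inr (p ++ pvSidePts q r dq dr n, q + dq * n, r + dr * n)
      else Sum.inl (p ++ pvSidePts q r dq dr (count.toNat - p.length)) := by
  induction n with
  | zero =>
    intro p q r dq dr hle
    rw [pvWalkSteps]
    rw [if_pos (by omega)]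
    simp [pvSidePts_zero]
  | succ n ih =>
    intro p q r dq dr hle
    rw [pvWalkSteps]
    by_cases hge : (p.length : Int) ≥ count
    · rw [if_pos hge, if_neg (by omega)]
      have : count.toNat - p.length = 0 := by omega
      simp [this, pvSidePts_zero]
    · rw [if_neg hge]
      rw [ih (p ++ [(q, r)]) (q + dq) (r + dr) dq dr (by simp; omega)]
      push_cast
      by_cases hc : (p.length : Int) + (n + 1) ≤ count
      · rw [if_pos (by simp; omega), if_pos (by omega)]
        rw [pvSidePts_succ q r dq dr n]
        rw [Sum.inr.injEq, Prod.mk.injEq, Prod.mk.injEq, List.append_assoc, List.singleton_append]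
        refine ⟨rfl, by ring, by ring⟩

      · rw [if_neg (by simp; omega), if_neg (by omega)]
        have h1 : count.toNat - (p ++ [(q, r)]).length = count.toNat - p.length - 1 := by
          simp; omega
        have h2 : count.toNat - p.length = (count.toNat - p.length - 1) + 1 := by omega
        rw [h1, h2, pvSidePts_succ q r dq dr]
        simp

theorem pvRingEnd_hex (q r : Int) (k : Nat) : pvRingEnd q r pvHexDirs k = (q, r) := by
  simp only [pvHexDirs, pvRingEnd]
  rw [Prod.mk.injEq]
  constructor <;> ring

/-- Characterisation of A's direction loop as one ring walk, truncated at `count`. -/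
theorem pvWalkDirs_char (count : Int) (dirs : List (Int × Int)) :
    ∀ (p : List (Int × Int)) (q r : Int) (k : Nat), (p.length : Int) ≤ count →
    pvWalkDirs count p q r k dirs =
      if ((p.length : Int) + k * dirs.length ≤ count) then
        Sum.inr (p ++ pvRingWalk q r dirs k, pvRingEnd q r dirs k)
      else Sum.inl ((p ++ pvRingWalk q r dirs k).take count.toNat) := by
  induction dirs with
  | nil =>
    intro p q r k hle
    rw [pvWalkDirs, if_pos (by simpa using hle)]
    simp [pvRingWalk, pvRingEnd]
  | cons d ds ih =>
    intro p q r k hle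
    obtain ⟨dq, dr⟩ := d
    have hs := pvWalkSteps_char count k p q r dq dr hle
    by_cases h1 : (p.length : Int) + k ≤ count
    · rw [if_pos h1] at hs
      rw [pvWalkDirs, hs]
      dsimp only
      rw [ih (p ++ pvSidePts q r dq dr k) (q + dq * k) (r + dr * k) k
            (by simp [pvSidePts_length]; omega)]
      by_cases h2 : (p.length : Int) + ((k : Int) * (ds.length : Int) + k) ≤ count
      · rw [if_pos (by simp [pvSidePts_length]; omega),
            if_pos (by push_cast [List.length_cons]; rw [mul_add, mul_one]; omega)]
        simp [pvRingWalk, pvRingEnd]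
      · rw [if_neg (by simp [pvSidePts_length]; omega),
            if_neg (by push_cast [List.length_cons]; rw [mul_add, mul_one]; omega)]
        simp [pvRingWalk]
    · rw [if_neg h1] at hs
      rw [pvWalkDirs, hs]
      dsimp only
      rw [if_neg (by push_cast [List.length_cons]; rw [mul_add, mul_one]
                     have : 0 ≤ (k : Int) * (ds.length : Int) := by positivity
                     omega)]
      congr 1
      have hc1 : count.toNat ≤ (p ++ pvSidePts q r dq dr k).length := by
        simp [pvSidePts_length]; omega
      rw [pvRingWalk, ← List.append_assoc, List.take_append_of_le_length hc1,
          List.take_append, pvSidePts_take,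
          List.take_of_length_le (show p.length ≤ count.toNat by omega),
          min_eq_left (by omega)]

/-- Characterisation of A's `while` loop: the remaining rings, truncated at `count`. -/
theorem pvSpiralLoop_char (count : Int) (j : Nat) :
    ∀ (p : List (Int × Int)) (q r : Int) (m : Nat), (p.length : Int) ≤ count →
    (count ≤ (p.length : Int) + (pvRingsFrom q r m j).length) →
    pvSpiralLoop count p q r m = (p ++ pvRingsFrom q r m j).take count.toNat := by
  induction j with
  | zero =>
    intro p q r m hle hen
    rw [pvSpiralLoop, dif_neg (by simp [pvRingsFrom] at hen; omega)]
    rw [PySem.List.slice_to _ (by omega)]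
    simp [pvRingsFrom]
  | succ j ih =>
    intro p q r m hle hen
    have hrs : pvRingsFrom q r m (j + 1)
        = pvRingWalk q (r - 1) pvHexDirs (m + 1) ++ pvRingsFrom q (r - 1) (m + 1) j := rfl
    have hlen6 : (pvRingWalk q (r - 1) pvHexDirs (m + 1)).length = (m + 1) * 6 := by
      rw [pvRingWalk_length]; simp [pvHexDirs]
    rw [pvSpiralLoop]
    by_cases hlt : (p.length : Int) < count
    · rw [dif_pos hlt]
      have hw := pvWalkDirs_char count pvHexDirs p q (r - 1) (m + 1) hle
      by_cases h2 : (p.length : Int) + (((m + 1) : Nat) : Int) * ((pvHexDirs.length : Nat) : Int) ≤ count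
      · rw [if_pos h2, pvRingEnd_hex] at hw
        have h2' : (p.length : Int) + 6 * (m + 1) ≤ count := by
          simp only [pvHexDirs, List.length_cons, List.length_nil] at h2
          push_cast at h2 ⊢; omega
        split
        · rename_i p0 heq
          rw [hw] at heq
          exact absurd heq (by simp)
        · rename_i p1 q1 r1 heq
          rw [hw] at heq
          simp only [Sum.inr.injEq, Prod.mk.injEq] at heq
          obtain ⟨hp1, hq1, hr1⟩ := heq
          subst hp1 hq1 hr1
          rw [ih (p ++ pvRingWalk q (r - 1) pvHexDirs (m + 1)) q (r - 1) (m + 1)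
                (by simp [hlen6]; omega)
                (by rw [hrs] at hen; simp [hlen6] at hen ⊢; omega)]
          rw [hrs, ← List.append_assoc]
      · rw [if_neg h2] at hw
        have h2' : count < (p.length : Int) + 6 * (m + 1) := by
          simp only [pvHexDirs, List.length_cons, List.length_nil] at h2
          push_cast at h2 ⊢; omega
        split
        · rename_i p0 heq
          rw [hw] at heq
          simp only [Sum.inl.injEq] at heq
          subst heq
          have hta : count.toNat ≤ (p ++ pvRingWalk q (r - 1) pvHexDirs (m + 1)).length := by
            rw [List.length_append, hlen6]; omega
          rw [hrs, ← List.append_assoc, List.take_append_of_le_length hta]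
        · rename_i p1 q1 r1 heq
          rw [hw] at heq
          exact absurd heq (by simp)
    · rw [dif_neg hlt, PySem.List.slice_to _ (by omega),
          List.take_append_of_le_length (by omega)]

/-- `generate_spiral_positions` equals the truncated abstract spiral. -/
theorem generate_char (count cq cr : Int) (J : Nat)
    (hJ : count ≤ 1 + ((pvRingsFrom cq cr 0 J).length : Int)) :
    generate_spiral_positions count cq cr = (pvSpiral cq cr J).take count.toNat := by
  unfold generate_spiral_positions
  by_cases hc : count ≤ 1
  · rw [if_pos hc]
    by_cases h0 : 0 ≤ count
    · rw [PySem.List.slice_to _ h0]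
      have : count.toNat = 0 ∨ count.toNat = 1 := by omega
      rcases this with h | h <;> simp [h, pvSpiral]
    · have hk : count = -((((-count).toNat : Nat)) : Int) := by omega
      rw [hk, PySem.List.slice_to_neg_natCast [(cq, cr)] (-count).toNat (by omega)]
      have h1 : (1 : Nat) - (-count).toNat = 0 := by omega
      have h2 : count.toNat = 0 := by omega
      simp [h1]
  · rw [if_neg hc]
    rw [pvSpiralLoop_char count J [(cq, cr)] cq cr 0 (by simp; omega)
          (by simpa using hJ)]
    rfl

/-- start coordinates of side `side` of a ring of radius `k` walked from `(q,r)`. -/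
def pvSegStart (q r : Int) (k : Nat) : List (Int × Int) → Nat → Int × Int
  | _, 0 => (q, r)
  | [], _ + 1 => (q, r)
  | (dq, dr) :: ds, s + 1 => pvSegStart (q + dq * k) (r + dr * k) k ds s

theorem pvSidePts_getElem? (q r dq dr : Int) (k step : Nat) (h : step < k) :
    (pvSidePts q r dq dr k)[step]? = some (q + dq * step, r + dr * step) := by
  simp [pvSidePts, List.getElem?_map, List.getElem?_range h]

theorem pvRingWalk_getElem? (k : Nat) : ∀ (dirs : List (Int × Int)) (q r : Int)
    (side step : Nat), side < dirs.length → step < k →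
    (pvRingWalk q r dirs k)[side * k + step]? =
      some ((pvSegStart q r k dirs side).1 + (dirs.getD side (0, 0)).1 * step,
            (pvSegStart q r k dirs side).2 + (dirs.getD side (0, 0)).2 * step) := by
  intro dirs
  induction dirs with
  | nil => intro q r side step hside _; simp at hside
  | cons d ds ih =>
    intro q r side step hside hstep
    obtain ⟨dq, dr⟩ := d
    match side with
    | 0 =>
      rw [pvRingWalk, List.getElem?_append_left (by simp [pvSidePts_length]; omega)]
      simpa [pvSegStart] using pvSidePts_getElem? q r dq dr k step hstep
    | s + 1 =>
      rw [pvRingWalk,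
          List.getElem?_append_right (by simp [pvSidePts_length]; nlinarith)]
      have harith : (s + 1) * k + step - (pvSidePts q r dq dr k).length = s * k + step := by
        rw [pvSidePts_length]; ring_nf; omega
      rw [harith, ih (q + dq * k) (r + dr * k) s step (by simpa using hside) hstep]
      rfl

theorem pvSegStart_hex (q r : Int) (k : Nat) : ∀ side : Nat, side < 6 →
    pvSegStart q r k pvHexDirs side =
      (q + (pvCorners.getD side (0, 0)).1 * k, r + (pvCorners.getD side (0, 0)).2 * k) := by
  intro side hside
  interval_cases side <;> simp [pvSegStart, pvHexDirs, pvCorners, Prod.ext_iff] <;> ring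

theorem pvRingsFrom_split (j1 : Nat) : ∀ (j2 : Nat) (q r : Int) (m : Nat),
    pvRingsFrom q r m (j1 + j2)
      = pvRingsFrom q r m j1 ++ pvRingsFrom q (r - (j1 : Int)) (m + j1) j2 := by
  induction j1 with
  | zero => intro j2 q r m; simp [pvRingsFrom]
  | succ j1 ih =>
    intro j2 q r m
    have h1 : j1 + 1 + j2 = (j1 + j2) + 1 := by omega
    rw [h1]
    show pvRingWalk q (r - 1) pvHexDirs (m + 1) ++ pvRingsFrom q (r - 1) (m + 1) (j1 + j2) = _
    rw [ih j2 q (r - 1) (m + 1)]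
    have h2 : r - 1 - (j1 : Int) = r - ((j1 : Nat) + 1 : Nat) := by push_cast; ring
    have h3 : m + 1 + j1 = m + (j1 + 1) := by omega
    rw [h2, h3, ← List.append_assoc]
    rfl

/-- index formula for the abstract spiral: the element at odometer `(km+1, side, step)`. -/
theorem pvSpiral_getElem? (cq cr : Int) (J km side step : Nat)
    (hs : side < 6) (hp : step < km + 1) (hJ : km + 1 ≤ J) :
    (pvSpiral cq cr J)[3 * (km + 1) * km + side * (km + 1) + step + 1]? =
      some (cq + (pvCorners.getD side (0, 0)).1 * ((km : Int) + 1)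
              + (pvHexDirs.getD side (0, 0)).1 * step,
            cr - ((km : Int) + 1) + (pvCorners.getD side (0, 0)).2 * ((km : Int) + 1)
              + (pvHexDirs.getD side (0, 0)).2 * step) := by
  have hJsplit : J = km + (J - km) := by omega
  have hlen1 : (pvRingsFrom cq cr 0 km).length = 3 * (km + 1) * km := by
    rw [pvRingsFrom_length]; ring
  rw [pvSpiral]
  rw [show 3 * (km + 1) * km + side * (km + 1) + step + 1
        = (3 * (km + 1) * km + side * (km + 1) + step) + 1 from rfl]
  rw [List.getElem?_cons_succ]
  rw [hJsplit, pvRingsFrom_split km (J - km) cq cr 0,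
      List.getElem?_append_right (by rw [hlen1]; omega)]
  have hoff : 3 * (km + 1) * km + side * (km + 1) + step - (pvRingsFrom cq cr 0 km).length
      = side * (km + 1) + step := by rw [hlen1]; omega
  rw [hoff]
  obtain ⟨j2, hj2⟩ : ∃ j2, J - km = j2 + 1 := ⟨J - km - 1, by omega⟩
  rw [hj2]
  show (pvRingWalk cq (cr - (km : Int) - 1) pvHexDirs (0 + km + 1)
          ++ pvRingsFrom cq (cr - (km : Int) - 1) (0 + km + 1) j2)[side * (km + 1) + step]?
        = _
  rw [List.getElem?_append_left
        (by rw [pvRingWalk_length]; simp [pvHexDirs]; nlinarith)]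
  rw [show 0 + km + 1 = km + 1 from by omega]
  rw [pvRingWalk_getElem? (km + 1) pvHexDirs cq (cr - (km : Int) - 1) side step
        (by simp [pvHexDirs]; omega) hp]
  rw [pvSegStart_hex cq (cr - (km : Int) - 1) (km + 1) side hs]
  simp only [Option.some.injEq, Prod.mk.injEq]
  push_cast
  constructor <;> ring

/-- B's loop invariant: after `i` iterations the accumulator holds the first `i`
spiral points and the odometer for index `i`. -/
theorem pvAlt_fold (cq cr : Int) (J : Nat) :
    ∀ (i km side step : Nat), side < 6 → step < km + 1 →
    i = 3 * (km + 1) * km + side * (km + 1) + step + 1 → km + 1 ≤ J →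
    (List.range i).foldl (fun st (n : Nat) => pvAltStep cq cr st (0 + (n : Int))) ([], 1, 0, 0)
      = ((pvSpiral cq cr J).take i, ((km : Int) + 1, (side : Int), (step : Int))) := by
  intro i
  induction i using Nat.strong_induction_on with
  | _ i ih =>
    intro km side step hs hp henc hJ
    by_cases h1 : i = 1
    · have h0 : 3 * (km + 1) * km + side * (km + 1) + step = 0 := by omega
      have hz : 3 * (km + 1) * km = 0 ∧ side * (km + 1) = 0 ∧ step = 0 := by omega
      have hkm : km = 0 := by
        rcases Nat.mul_eq_zero.mp hz.1 with h | h
        · omega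
        · exact h
      have hside : side = 0 := by
        rcases Nat.mul_eq_zero.mp hz.2.1 with h | h
        · exact h
        · omega
      subst hkm hside h1
      simp [hz.2.2, List.range_one, pvAltStep, pvSpiral]
    · obtain ⟨ip, hip⟩ : ∃ ip, i = ip + 1 := ⟨i - 1, by omega⟩
      have hip1 : 1 ≤ ip := by omega
      rcases Nat.eq_zero_or_pos step with hstep0 | hstep1
      case neg.inr =>
        -- (a) previous odometer: (km, side, step - 1)
        have hprev : ip = 3 * (km + 1) * km + side * (km + 1) + (step - 1) + 1 := by omega
        rw [hip, List.range_succ, List.foldl_append,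
            ih ip (by omega) km side (step - 1) hs (by omega) hprev hJ]
        simp only [List.foldl_cons, List.foldl_nil]
        rw [pvAltStep, if_neg (by push_cast; omega)]
        simp only [PySem.List.pyGetD_natCast]
        rw [if_neg (by push_cast; omega)]
        have hget := pvSpiral_getElem? cq cr J km side (step - 1) hs (by omega) hJ
        rw [← hprev] at hget
        rw [List.take_add_one, hget]
        simp only [Option.toList_some]
        rw [Prod.mk.injEq, Prod.mk.injEq, Prod.mk.injEq]
        refine ⟨rfl, rfl, rfl, by push_cast; omega⟩
      case neg.inl =>
        subst hstep0
        rcases Nat.eq_zero_or_pos side with hside0 | hside1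
        · -- (c) previous odometer: (km - 1, 5, km - 1), and km ≥ 1
          subst hside0
          obtain ⟨mm, hmm⟩ : ∃ mm, km = mm + 1 := by
            refine ⟨km - 1, ?_⟩
            by_contra hk
            have : km = 0 := by omega
            subst this
            simp at henc
            omega
          subst hmm
          have hprev : ip = 3 * (mm + 1) * mm + 5 * (mm + 1) + mm + 1 := by
            have : 3 * (mm + 1 + 1) * (mm + 1) = 3 * (mm + 1) * mm + 5 * (mm + 1) + mm + 1 := by
              ring
            omega
          rw [hip, List.range_succ, List.foldl_append,
              ih ip (by omega) mm 5 mm (by omega) (by omega)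
                hprev (by omega)]
          simp only [List.foldl_cons, List.foldl_nil]
          rw [pvAltStep, if_neg (by push_cast; omega)]
          simp only [PySem.List.pyGetD_natCast]
          simp only [if_true]
          rw [if_pos (by norm_num)]
          have hget := pvSpiral_getElem? cq cr J mm 5 mm (by omega) (by omega) (by omega)
          have hgi : 3 * (mm + 1) * mm + 5 * (mm + 1) + mm + 1 = ip := hprev.symm
          rw [hgi] at hget
          rw [List.take_add_one, hget]
          simp only [Option.toList_some]
          rw [Prod.mk.injEq, Prod.mk.injEq, Prod.mk.injEq]
          refine ⟨by push_cast; ring_nf, by push_cast; ring, rfl, rfl⟩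
        · -- (b) previous odometer: (km, side - 1, km)
          obtain ⟨ss, hss⟩ : ∃ ss, side = ss + 1 := ⟨side - 1, by omega⟩
          subst hss
          have hprev : ip = 3 * (km + 1) * km + ss * (km + 1) + km + 1 := by
            have : (ss + 1) * (km + 1) = ss * (km + 1) + (km + 1) := by ring
            omega
          rw [hip, List.range_succ, List.foldl_append,
              ih ip (by omega) km ss km (by omega) (by omega) hprev hJ]
          simp only [List.foldl_cons, List.foldl_nil]
          rw [pvAltStep, if_neg (by push_cast; omega)]
          simp only [PySem.List.pyGetD_natCast]
          simp only [if_true]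
          rw [if_neg (by push_cast; omega)]
          have hget := pvSpiral_getElem? cq cr J km ss km (by omega) (by omega) hJ
          have hgi : 3 * (km + 1) * km + ss * (km + 1) + km + 1 = ip := hprev.symm
          rw [hgi] at hget
          rw [List.take_add_one, hget]
          simp only [Option.toList_some]
          rw [Prod.mk.injEq, Prod.mk.injEq, Prod.mk.injEq]
          refine ⟨rfl, rfl, by push_cast; ring, rfl⟩

/-- every positive index has a (unique) odometer decomposition. -/
theorem pvExistsOdometer : ∀ i : Nat, 1 ≤ i → ∃ km side step : Nat,
    side < 6 ∧ step < km + 1 ∧ i = 3 * (km + 1) * km + side * (km + 1) + step + 1 ∧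
    km + 1 ≤ i := by
  intro i
  induction i with
  | zero => omega
  | succ i ih =>
    intro _
    by_cases hi : i = 0
    · exact ⟨0, 0, 0, by omega, by omega, by subst hi; norm_num, by omega⟩
    · obtain ⟨km, side, step, hs, hp, henc, hk⟩ := ih (by omega)
      by_cases h1 : step < km
      · exact ⟨km, side, step + 1, hs, by omega, by omega, by omega⟩
      · have hstep : step = km := by omega
        subst step
        by_cases h2 : side < 5
        · refine ⟨km, side + 1, 0, by omega, by omega, ?_, by omega⟩
          have : (side + 1) * (km + 1) = side * (km + 1) + (km + 1) := by ring
          omega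
        · have hside : side = 5 := by omega
          subst side
          refine ⟨km + 1, 0, 0, by omega, by omega, ?_, by omega⟩
          have : 3 * (km + 1 + 1) * (km + 1) = 3 * (km + 1) * km + 5 * (km + 1) + km + 1 := by
            ring
          omega

/-- `generate_spiral_positions_alt` equals the truncated abstract spiral. -/
theorem alt_char (count cq cr : Int) (J : Nat) (hJ : count.toNat ≤ J) :
    generate_spiral_positions_alt count cq cr = (pvSpiral cq cr J).take count.toNat := by
  unfold generate_spiral_positions_alt
  by_cases hc : count ≤ 0
  · rw [PySem.List.pyRange_one_eq_nil hc]
    simp [show count.toNat = 0 by omega]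
  · have h1 : 1 ≤ count.toNat := by omega
    obtain ⟨km, side, step, hs, hp, henc, hk⟩ := pvExistsOdometer count.toNat h1
    rw [PySem.List.pyRange_one 0 count, List.foldl_map,
        show (count - 0).toNat = count.toNat from by omega,
        pvAlt_fold cq cr J count.toNat km side step hs hp henc (by omega)]

-- ===== VERDICT (by name: the statement is the Claim_ definition above) =====
theorem generate_spiral_positions_spec : Claim_equal_generate_spiral_positions := by
  unfold Claim_equal_generate_spiral_positions
  intro count cq cr _
  unfold Spec_generate_spiral_positions
  have hb : count ≤ 1 + ((pvRingsFrom cq cr 0 count.toNat).length : Int) := by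
    rw [pvRingsFrom_length]
    have h1 : count ≤ (count.toNat : Int) := Int.self_le_toNat count
    have h2 : (count.toNat : Int)
        ≤ 1 + ((6 * 0 * count.toNat + 3 * count.toNat * (count.toNat + 1) : Nat) : Int) := by
      push_cast
      nlinarith [Int.natCast_nonneg count.toNat]
    omega
  rw [generate_char count cq cr count.toNat hb, alt_char count cq cr count.toNat le_rfl]
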